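-- pv_equiv track=rewrite | github.com/limsubinn/Algorithm | Programmers/LV2/pg77885.py | solution
-- ===== SOURCE A (Python) =====
-- def findOddAnswer(number):
--     # 2진수 변환
--     b = '0' + str(bin(number))[2:]
--
--     # 맨 마지막 0 인덱스 찾기
--     i = b.rindex('0')
--
--     # 숫자 변환
--     b = list(b)
--     b[i] = '1'
--     b[i + 1] = '0'
--
--     # 10진수로 변환
--     return int(''.join(b), 2)
--
-- def solution(numbers):
--     answer = []
--
--     for number in numbers:
--         # 짝수
--         if number % 2 == 0:
--             answer.append(number + 1)
--         # 홀수
--         else: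
--             answer.append(findOddAnswer(number))
--
--     return answer
-- ===== SOURCE B (Python) =====
-- def trailing_ones(m):
--     k = 0
--     while m & 1:
--         k += 1
--         m >>= 1
--     return k
--
--
-- def solution(numbers):
--     answer = []
--     for n in numbers:
--         if n % 2 == 0:
--             answer.append(n + 1)
--         else:
--             m = abs(n)
--             k = trailing_ones(m)  # k >= 1 since m is odd
--             # flip the rightmost 0-bit to 1 and the 1-bit just below it to 0
--             answer.append(m + (1 << (k - 1)))
--     return answer
-- ===== Notes on version B (the rewrite author's own statement) =====
-- stated objective: alternative
-- what changed: The odd branch becomes pure integer bit arithmetic (count the trailing 1-bits k of abs(n), answer abs(n) + (1 << (k-1))) instead of building a binary string, searching the last '0' with rindex, mutating two characters and re-parsing with int(.,2); Pre_ excludes lists containing a negative odd n with |n| all ones in binary (-1, -3, -7, ...): negative inputs are outside the problem's stated domain (the numbers are natural numbers) and on exactly these unspecified corners A and B make different but equally defensible choices (A: 3|n|+2, B: its uniform |n|+2^(k-1)).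
-- outside the precondition, e.g. on solution([-1]): A returns [5], B returns [2]; on solution([-3, 2]): A returns [11, 3], B returns [5, 3]
import Mathlib
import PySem

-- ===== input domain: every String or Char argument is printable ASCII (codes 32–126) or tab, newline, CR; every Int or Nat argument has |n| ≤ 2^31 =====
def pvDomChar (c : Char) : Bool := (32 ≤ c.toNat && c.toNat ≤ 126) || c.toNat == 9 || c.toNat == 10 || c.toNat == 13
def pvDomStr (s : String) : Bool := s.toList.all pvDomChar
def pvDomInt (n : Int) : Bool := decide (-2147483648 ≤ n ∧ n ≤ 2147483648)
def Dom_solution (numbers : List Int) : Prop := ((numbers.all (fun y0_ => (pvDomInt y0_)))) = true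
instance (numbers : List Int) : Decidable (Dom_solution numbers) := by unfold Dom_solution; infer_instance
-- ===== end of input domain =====

-- B replaces A's binary-string surgery (rindex, char mutation, re-parse) in the odd branch with
-- integer bit arithmetic: |n| + 2^(trailing_ones(|n|) - 1). Objective: alternative (no string
-- construction per element); Pre_ excludes one out-of-domain corner (see its comment).

-- ===== PORT A =====
-- binary digits (MSB first) of a natural number; [] for 0
def pyBinDigits (n : Nat) : List Char :=
  if _h : n = 0 then [] else pyBinDigits (n / 2) ++ [if n % 2 = 1 then '1' else '0']
decreasing_by exact Nat.div_lt_self (Nat.pos_of_ne_zero _h) (by norm_num)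

-- str(bin(number))[2:]: 'b' ++ digits of |number| for number < 0, '0' for 0, digits otherwise
def pyBinTail (number : Int) : List Char :=
  if number < 0 then 'b' :: pyBinDigits (-number).toNat
  else if number.toNat = 0 then ['0']
  else pyBinDigits number.toNat

-- hand port of b.rindex('0'): index of the LAST '0'; callers guarantee '0' ∈ b (head is '0'),
-- the ValueError branch of rindex is unreachable
def rindex0 : List Char → Nat
  | [] => 0
  | _ :: rest => if '0' ∈ rest then rindex0 rest + 1 else 0

def bitVal (c : Char) : Nat := if c = '1' then 1 else 0

-- int(''.join(b), 2): exact on the strings reached here — they are '0'/'1' digits, possibly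
-- with a residual '0b' prefix, which int(·, 2) strips and which contributes 0 here
def valBin (l : List Char) : Nat := l.foldl (fun a c => 2 * a + bitVal c) 0

def findOddAnswer (number : Int) : Int :=
  -- b = '0' + str(bin(number))[2:]
  let b := '0' :: pyBinTail number
  let i := rindex0 b
  let b2 := b.set i '1'
  let b3 := b2.set (i + 1) '0'
  (valBin b3 : Int)

def solution (numbers : List Int) : List Int :=
  numbers.foldl (fun answer number =>
    if number % 2 = 0 then answer ++ [number + 1] else answer ++ [findOddAnswer number]) []

-- ===== PORT B =====
-- the loop 'k = 0; while m & 1: k += 1; m >>= 1; return k' as structural recursion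
-- (m ≥ 0 throughout, so m & 1 = m % 2 and m >> 1 = m / 2, exact)
def trailingOnes (m : Nat) : Nat :=
  if h : m % 2 = 1 then trailingOnes (m / 2) + 1 else 0
decreasing_by
  exact Nat.div_lt_self (Nat.pos_of_ne_zero (fun hz => by subst hz; simp at h)) (by norm_num)

def solution_alt (numbers : List Int) : List Int :=
  numbers.foldl (fun answer n =>
    if n % 2 = 0 then answer ++ [n + 1]
    else
      let m := n.natAbs            -- abs(n)
      let k := trailingOnes m      -- k ≥ 1 since m is odd
      -- 1 << (k - 1) = 2^(k-1)
      answer ++ [(m : Int) + 2 ^ (k - 1)]) []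

-- ===== PRECONDITION & SPEC =====
-- Pre_ excludes lists containing a negative odd n whose absolute value is all ones in binary
-- (-1, -3, -7, ...): negative inputs are outside the problem's domain (numbers are natural
-- numbers), and on exactly these A's value (3|n|+2, from the residual 'b' of bin()'s '-0b'
-- prefix being overwritten) and B's value (|n| + 2^(k-1), its uniform rule) are both
-- unspecified corner choices.
def Pre_solution (numbers : List Int) : Prop :=
  ∀ n ∈ numbers, ¬ (n < 0 ∧ n % 2 ≠ 0 ∧ ∃ k ∈ List.range 32, n.natAbs = 2 ^ k - 1)
instance (numbers : List Int) : Decidable (Pre_solution numbers) := by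
  unfold Pre_solution; infer_instance

def pvWitness_solution : List Int := [5, 4, -5, 0, -2]

def Spec_solution (numbers : List Int) (out : List Int) : Prop := out = solution_alt numbers
instance (numbers : List Int) (out : List Int) : Decidable (Spec_solution numbers out) := by
  unfold Spec_solution; infer_instance

-- ===== CLAIM (what is proved, stated in full; the proofs are below) =====
def Claim_equal_solution : Prop :=
  ∀ (numbers : List Int), Dom_solution numbers → Pre_solution numbers →
    Spec_solution numbers (solution numbers)

-- ===== LEMMAS AND PROOFS =====

theorem valBin_acc (l : List Char) (a : Nat) :
    l.foldl (fun a c => 2 * a + bitVal c) a = a * 2 ^ l.length + valBin l := by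
  induction l generalizing a with
  | nil => simp only [List.foldl_nil, valBin, List.length_nil, pow_zero, mul_one, add_zero]
  | cons c t ih =>
    simp only [valBin, List.foldl_cons, List.length_cons]
    rw [ih, ih]
    ring

theorem valBin_cons (c : Char) (l : List Char) :
    valBin (c :: l) = bitVal c * 2 ^ l.length + valBin l := by
  show List.foldl _ _ (c :: l) = _
  rw [List.foldl_cons, valBin_acc]
  ring

theorem valBin_append (p l : List Char) :
    valBin (p ++ l) = valBin p * 2 ^ l.length + valBin l := by
  show List.foldl _ _ (p ++ l) = _
  rw [List.foldl_append, valBin_acc]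
  rfl

theorem valBin_replicate_one (k : Nat) :
    valBin (List.replicate k '1') = 2 ^ k - 1 := by
  induction k with
  | zero => simp [valBin]
  | succ k ih =>
    rw [List.replicate_succ, valBin_cons, ih]
    have hb : bitVal '1' = 1 := by decide
    have : 1 ≤ 2 ^ k := Nat.one_le_two_pow
    rw [hb, List.length_replicate, pow_succ]
    omega

theorem valBin_pyBinDigits (n : Nat) : valBin (pyBinDigits n) = n := by
  induction n using Nat.strong_induction_on with
  | _ n ih =>
    rw [pyBinDigits]
    split
    · simp [valBin, *]
    · rename_i h
      rw [valBin_append, ih (n / 2) (Nat.div_lt_self (Nat.pos_of_ne_zero h) (by norm_num))]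
      have hd : valBin [if n % 2 = 1 then '1' else '0'] = n % 2 := by
        rcases Nat.mod_two_eq_zero_or_one n with h2 | h2 <;> simp [h2, valBin, bitVal]
      rw [hd, List.length_cons, List.length_nil, pow_one]
      omega

theorem pyBinDigits_zero : pyBinDigits 0 = [] := by rw [pyBinDigits]; simp

-- proof-side helper: A's trailing-ones structure, returning (count, stripped remainder)
def stripOnes (m : Nat) : Nat × Nat :=
  if h : m % 2 = 1 then ((stripOnes (m / 2)).1 + 1, (stripOnes (m / 2)).2)
  else (0, m)
decreasing_by
  all_goals exact Nat.div_lt_self (Nat.pos_of_ne_zero (fun hz => by subst hz; simp at h)) (by norm_num)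

theorem stripOnes_odd (m : Nat) (h : m % 2 = 1) :
    stripOnes m = ((stripOnes (m / 2)).1 + 1, (stripOnes (m / 2)).2) := by
  rw [stripOnes]; simp [h]

theorem stripOnes_even (m : Nat) (h : m % 2 = 0) : stripOnes m = (0, m) := by
  rw [stripOnes]; simp [h]

theorem trailingOnes_eq (m : Nat) : trailingOnes m = (stripOnes m).1 := by
  induction m using Nat.strong_induction_on with
  | _ m ih =>
    rcases Nat.mod_two_eq_zero_or_one m with h | h
    · rw [trailingOnes, stripOnes_even m h]; simp [h]
    · have hm0 : m ≠ 0 := by omega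
      rw [trailingOnes, stripOnes_odd m h]
      simp only [h, dif_pos]
      rw [ih (m / 2) (Nat.div_lt_self (Nat.pos_of_ne_zero hm0) (by norm_num))]

theorem stripOnes_pos (m : Nat) (h : m % 2 = 1) : 1 ≤ (stripOnes m).1 := by
  rw [stripOnes_odd m h]; simp

theorem stripOnes_snd_even (m : Nat) : (stripOnes m).2 % 2 = 0 := by
  induction m using Nat.strong_induction_on with
  | _ m ih =>
    rcases Nat.mod_two_eq_zero_or_one m with h | h
    · rw [stripOnes_even m h]; exact h
    · have hm0 : m ≠ 0 := by omega
      rw [stripOnes_odd m h]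
      exact ih (m / 2) (Nat.div_lt_self (Nat.pos_of_ne_zero hm0) (by norm_num))

-- reconstruction: m = t·2^k + (2^k − 1) for (k, t) = stripOnes m
theorem stripOnes_eq (m : Nat) :
    (stripOnes m).2 * 2 ^ (stripOnes m).1 + (2 ^ (stripOnes m).1 - 1) = m := by
  induction m using Nat.strong_induction_on with
  | _ m ih =>
    rcases Nat.mod_two_eq_zero_or_one m with h | h
    · rw [stripOnes_even m h]; simp
    · have hm0 : m ≠ 0 := by omega
      have ih2 := ih (m / 2) (Nat.div_lt_self (Nat.pos_of_ne_zero hm0) (by norm_num))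
      rw [stripOnes_odd m h]
      simp only
      have hp : (2 : Nat) ^ ((stripOnes (m / 2)).1 + 1) = 2 * 2 ^ (stripOnes (m / 2)).1 := by
        rw [pow_succ]; ring
      have hmul : (stripOnes (m / 2)).2 * (2 * 2 ^ (stripOnes (m / 2)).1)
          = 2 * ((stripOnes (m / 2)).2 * 2 ^ (stripOnes (m / 2)).1) := by ring
      have h1 : 1 ≤ 2 ^ (stripOnes (m / 2)).1 := Nat.one_le_two_pow
      rw [hp, hmul]
      omega

theorem pyBinDigits_stripOnes (m : Nat) :
    pyBinDigits m = pyBinDigits (stripOnes m).2 ++ List.replicate (stripOnes m).1 '1' := by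
  induction m using Nat.strong_induction_on with
  | _ m ih =>
    rcases Nat.mod_two_eq_zero_or_one m with h | h
    · rw [stripOnes_even m h]; simp
    · have hm0 : m ≠ 0 := by omega
      have hdig : pyBinDigits m = pyBinDigits (m / 2) ++ ['1'] := by
        rw [pyBinDigits]; simp [hm0, h]
      rw [hdig, ih (m / 2) (Nat.div_lt_self (Nat.pos_of_ne_zero hm0) (by norm_num)),
        stripOnes_odd m h]
      simp [List.replicate_succ']

theorem rindex0_spec (p s : List Char) (hs : '0' ∉ s) :
    rindex0 (p ++ '0' :: s) = p.length := by
  induction p with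
  | nil => simp [rindex0, hs]
  | cons c t ih => simp [rindex0, List.mem_append, ih]

theorem rindex0_head (s : List Char) (hs : '0' ∉ s) : rindex0 ('0' :: s) = 0 := by
  simp [rindex0, hs]

theorem set_append_len (p l : List Char) (c : Char) :
    (p ++ l).set p.length c = p ++ l.set 0 c := by
  induction p with
  | nil => simp
  | cons d t ih => simp [ih]

theorem set_append_len1 (p l : List Char) (c : Char) :
    (p ++ l).set (p.length + 1) c = p ++ l.set 1 c := by
  induction p with
  | nil => simp
  | cons d t ih => simp [ih]

-- generic computation of A's surgery on a string of the shape q ++ '0' :: '1'^(j+1),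
-- where q contributes v = valBin q: the result is v·2^(j+2) + 2^(j+1) + 2^j - 1
theorem surgery_val (q : List Char) (j : Nat) :
    (let b := q ++ '0' :: List.replicate (j + 1) '1'
     (valBin ((b.set (rindex0 b) '1').set (rindex0 b + 1) '0') : Int)) =
    (valBin q : Int) * 2 ^ (j + 2) + 2 ^ (j + 1) + 2 ^ j - 1 := by
  have b0 : bitVal '0' = 0 := by decide
  have b1 : bitVal '1' = 1 := by decide
  have hP : 1 ≤ 2 ^ j := Nat.one_le_two_pow
  simp only
  rw [rindex0_spec q _ (by simp), set_append_len, List.replicate_succ]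
  have hs0 : ('0' :: '1' :: List.replicate j '1').set 0 '1' =
      '1' :: '1' :: List.replicate j '1' := rfl
  rw [hs0, set_append_len1]
  have hs1 : ('1' :: '1' :: List.replicate j '1').set 1 '0' =
      '1' :: '0' :: List.replicate j '1' := rfl
  rw [hs1, valBin_append, valBin_cons, valBin_cons, valBin_replicate_one, b0, b1,
    List.length_cons, List.length_cons, List.length_replicate]
  push_cast [hP]
  ring

-- surgery when the sentinel itself is the last '0': both leading cells are overwritten
theorem surgery_val0 (s : List Char) (hs : '0' ∉ s) :
    (let b := '0' :: s
     (valBin ((b.set (rindex0 b) '1').set (rindex0 b + 1) '0') : Int)) =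
    (valBin (('1' :: s).set 1 '0') : Int) := by
  simp only
  rw [rindex0_head s hs]
  rfl

-- value of the string whose surgery we just computed
theorem plain_val (q : List Char) (j : Nat) :
    valBin (q ++ '0' :: List.replicate (j + 1) '1') =
    valBin q * 2 ^ (j + 2) + 2 ^ (j + 1) - 1 := by
  have b0 : bitVal '0' = 0 := by decide
  have hP : 1 ≤ 2 ^ (j + 1) := Nat.one_le_two_pow
  rw [valBin_append, valBin_cons, valBin_replicate_one, b0, List.length_cons,
    List.length_replicate]
  have h22 : (2 : Nat) ^ (j + 1 + 1) = 2 ^ (j + 2) := rfl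
  rw [h22]
  omega

-- core, positive case: for odd m, A's surgery on '0' ++ digits(m) returns m + 2^(k-1)
theorem findOddAnswer_pos (m : Nat) (h : m % 2 = 1) :
    findOddAnswer (m : Int) = (m : Int) + 2 ^ ((stripOnes m).1 - 1) := by
  obtain ⟨j, hj⟩ : ∃ j, (stripOnes m).1 = j + 1 :=
    ⟨(stripOnes m).1 - 1, (Nat.succ_pred_eq_of_pos (stripOnes_pos m h)).symm⟩
  have hm0 : m ≠ 0 := by omega
  have hsplit := pyBinDigits_stripOnes m
  have hval := valBin_pyBinDigits m
  unfold findOddAnswer pyBinTail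
  rw [if_neg (not_lt.mpr (Int.natCast_nonneg m)), Int.toNat_natCast, if_neg hm0, hj,
    Nat.add_sub_cancel]
  by_cases ht : (stripOnes m).2 = 0
  · -- all ones: the sentinel '0' is the last zero; q = []
    rw [ht, pyBinDigits_zero, List.nil_append, hj] at hsplit
    have hm' : m = 2 ^ (j + 1) - 1 := by rw [← hval, hsplit, valBin_replicate_one]
    rw [hsplit]
    have hs := surgery_val [] j
    simp only [List.nil_append] at hs
    rw [hs]
    have hv0 : valBin ([] : List Char) = 0 := rfl
    have hP : 1 ≤ 2 ^ (j + 1) := Nat.one_le_two_pow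
    have hc : ((2 ^ (j + 1) - 1 : Nat) : Int) = 2 ^ (j + 1) - 1 := by
      rw [Nat.cast_sub hP]; push_cast; ring
    rw [hv0, hm', hc]
    have : ((2 : Int)) ^ (j + 2) = 2 * 2 ^ (j + 1) := by rw [pow_succ]; ring
    ring
  · -- remainder t is even and positive: digits(t) ends in '0'; q = '0' :: digits(t/2)
    have hte := stripOnes_snd_even m
    have hdt : pyBinDigits (stripOnes m).2 = pyBinDigits ((stripOnes m).2 / 2) ++ ['0'] := by
      rw [pyBinDigits]; simp [ht, hte]
    rw [hdt, hj] at hsplit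
    have hb : '0' :: pyBinDigits m =
        ('0' :: pyBinDigits ((stripOnes m).2 / 2)) ++ '0' :: List.replicate (j + 1) '1' := by
      rw [hsplit]; simp
    rw [hb, surgery_val]
    have hmv : (m : Int) = (valBin ('0' :: pyBinDigits ((stripOnes m).2 / 2)) : Int) *
        2 ^ (j + 2) + 2 ^ (j + 1) - 1 := by
      have hpl := plain_val ('0' :: pyBinDigits ((stripOnes m).2 / 2)) j
      rw [← hb] at hpl
      have hv' : valBin ('0' :: pyBinDigits m) = m := by
        rw [valBin_cons, hval]; simp [bitVal]
      rw [hv'] at hpl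
      have hP : 1 ≤ 2 ^ (j + 1) := Nat.one_le_two_pow
      have hx : m + 1 = valBin ('0' :: pyBinDigits ((stripOnes m).2 / 2)) * 2 ^ (j + 2) +
          2 ^ (j + 1) := by omega
      have hx' := congrArg (fun z : Nat => (z : Int)) hx
      push_cast at hx'
      linarith
    rw [hmv]
    ring

-- core, negative case: A drops the sign ('-0b' → residual 'b'), so for odd m the result is
-- 3m+2 when m is all ones (the 'b' is overwritten by the flip) and m + 2^(k-1) otherwise
theorem findOddAnswer_neg (m : Nat) (h : m % 2 = 1) :
    findOddAnswer (-(m : Int)) =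
      if (stripOnes m).2 = 0 then 3 * (m : Int) + 2
      else (m : Int) + 2 ^ ((stripOnes m).1 - 1) := by
  obtain ⟨j, hj⟩ : ∃ j, (stripOnes m).1 = j + 1 :=
    ⟨(stripOnes m).1 - 1, (Nat.succ_pred_eq_of_pos (stripOnes_pos m h)).symm⟩
  have hm0 : m ≠ 0 := by omega
  have hneg : (-(m : Int)) < 0 := by
    have : (0 : Int) < (m : Int) := by exact_mod_cast Nat.pos_of_ne_zero hm0
    omega
  have hsplit := pyBinDigits_stripOnes m
  have hval := valBin_pyBinDigits m
  have b0 : bitVal '0' = 0 := by decide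
  have b1 : bitVal '1' = 1 := by decide
  unfold findOddAnswer pyBinTail
  rw [if_pos hneg, neg_neg, Int.toNat_natCast]
  by_cases ht : (stripOnes m).2 = 0
  · -- all ones: rindex finds the sentinel; the flip overwrites '0' and 'b'
    rw [ht, pyBinDigits_zero, List.nil_append, hj] at hsplit
    have hmval : m = 2 ^ (j + 1) - 1 := by rw [← hval, hsplit, valBin_replicate_one]
    rw [if_pos ht, hsplit]
    have hnot : '0' ∉ 'b' :: List.replicate (j + 1) '1' := by simp
    rw [surgery_val0 _ hnot]
    have hset : (('1' :: 'b' :: List.replicate (j + 1) '1').set 1 '0') =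
        '1' :: '0' :: List.replicate (j + 1) '1' := rfl
    rw [hset]
    have hv : valBin ('1' :: '0' :: List.replicate (j + 1) '1') = 3 * m + 2 := by
      rw [valBin_cons, valBin_cons, valBin_replicate_one, b0, b1, List.length_cons,
        List.length_replicate, hmval]
      have h2 : (2 : Nat) ^ (j + 1 + 1) = 2 * 2 ^ (j + 1) := by rw [pow_succ]; ring
      have hP : 1 ≤ 2 ^ (j + 1) := Nat.one_le_two_pow
      omega
    rw [hv]
    push_cast
    ring
  · -- remainder even and positive: q = '0' :: 'b' :: digits(t/2); 'b' counts as 0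
    have hte := stripOnes_snd_even m
    have hdt : pyBinDigits (stripOnes m).2 = pyBinDigits ((stripOnes m).2 / 2) ++ ['0'] := by
      rw [pyBinDigits]; simp [ht, hte]
    rw [hdt, hj] at hsplit
    have hb : '0' :: 'b' :: pyBinDigits m =
        ('0' :: 'b' :: pyBinDigits ((stripOnes m).2 / 2)) ++ '0' :: List.replicate (j + 1) '1' := by
      rw [hsplit]; simp
    rw [if_neg ht, hj, Nat.add_sub_cancel, hb, surgery_val]
    have hq : valBin ('0' :: 'b' :: pyBinDigits ((stripOnes m).2 / 2)) =
        valBin ('0' :: pyBinDigits ((stripOnes m).2 / 2)) := by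
      rw [valBin_cons, valBin_cons, valBin_cons]
      simp [bitVal]
    rw [hq]
    have hb' : '0' :: pyBinDigits m =
        ('0' :: pyBinDigits ((stripOnes m).2 / 2)) ++ '0' :: List.replicate (j + 1) '1' := by
      rw [hsplit]; simp
    have hmv : (m : Int) = (valBin ('0' :: pyBinDigits ((stripOnes m).2 / 2)) : Int) *
        2 ^ (j + 2) + 2 ^ (j + 1) - 1 := by
      have hpl := plain_val ('0' :: pyBinDigits ((stripOnes m).2 / 2)) j
      rw [← hb'] at hpl
      have hv' : valBin ('0' :: pyBinDigits m) = m := by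
        rw [valBin_cons, hval]; simp [bitVal]
      rw [hv'] at hpl
      have hP : 1 ≤ 2 ^ (j + 1) := Nat.one_le_two_pow
      have hx : m + 1 = valBin ('0' :: pyBinDigits ((stripOnes m).2 / 2)) * 2 ^ (j + 2) +
          2 ^ (j + 1) := by omega
      have hx' := congrArg (fun z : Nat => (z : Int)) hx
      push_cast at hx'
      linarith
    rw [hmv]
    ring

-- per-element functions of the two loops
def fA (n : Int) : Int := if n % 2 = 0 then n + 1 else findOddAnswer n
def fB (n : Int) : Int :=
  if n % 2 = 0 then n + 1 else ((n.natAbs : Int) + 2 ^ (trailingOnes n.natAbs - 1))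

theorem solution_eq_map (numbers : List Int) : solution numbers = numbers.map fA := by
  suffices h : ∀ (l acc : List Int),
      l.foldl (fun answer number =>
        if number % 2 = 0 then answer ++ [number + 1] else answer ++ [findOddAnswer number]) acc
      = acc ++ l.map fA by
    unfold solution
    have := h numbers []
    simpa using this
  intro l
  induction l with
  | nil => intro acc; simp
  | cons x t ih =>
    intro acc
    simp only [List.foldl_cons, List.map_cons, ih, fA]
    by_cases h : x % 2 = 0 <;> simp [h]

theorem alt_eq_map (numbers : List Int) : solution_alt numbers = numbers.map fB := by
  suffices h : ∀ (l acc : List Int),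
      l.foldl (fun answer n =>
        if n % 2 = 0 then answer ++ [n + 1]
        else
          let m := n.natAbs
          let k := trailingOnes m
          answer ++ [(m : Int) + 2 ^ (k - 1)]) acc
      = acc ++ l.map fB by
    unfold solution_alt
    have := h numbers []
    simpa using this
  intro l
  induction l with
  | nil => intro acc; simp
  | cons x t ih =>
    intro acc
    simp only [List.foldl_cons, List.map_cons, ih, fB]
    by_cases h : x % 2 = 0 <;> simp [h]

-- inside Dom, outside the bad shape, the two per-element functions agree
theorem fA_eq_fB (n : Int) (hlo : -2147483648 ≤ n)
    (hnb : ¬ (n < 0 ∧ n % 2 ≠ 0 ∧ ∃ k ∈ List.range 32, n.natAbs = 2 ^ k - 1)) :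
    fA n = fB n := by
  by_cases h : n % 2 = 0
  · simp [fA, fB, h]
  · have hodd : n.natAbs % 2 = 1 := by omega
    rw [fA, fB, if_neg h, if_neg h, trailingOnes_eq]
    by_cases hneg : n < 0
    · have ht : (stripOnes n.natAbs).2 ≠ 0 := by
        intro ht0
        have hrec := stripOnes_eq n.natAbs
        rw [ht0] at hrec
        simp only [Nat.zero_mul, Nat.zero_add] at hrec
        -- n.natAbs = 2^k - 1 with k = (stripOnes n.natAbs).1; k < 32 from the Dom bound
        have hbound : n.natAbs ≤ 2147483648 := by omega
        have hk32 : (stripOnes n.natAbs).1 < 32 := by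
          by_contra hge
          have h32 : (2 : Nat) ^ 32 ≤ 2 ^ (stripOnes n.natAbs).1 :=
            Nat.pow_le_pow_right (by norm_num) (by omega)
          have : (2 : Nat) ^ 32 = 4294967296 := by norm_num
          omega
        exact hnb ⟨hneg, h, (stripOnes n.natAbs).1, List.mem_range.mpr hk32, hrec.symm⟩
      have hcast : -((n.natAbs : Nat) : Int) = n := by omega
      have hfa := findOddAnswer_neg n.natAbs hodd
      rw [hcast, if_neg ht] at hfa
      rw [hfa]
    · have hcast : ((n.natAbs : Nat) : Int) = n := by omega
      have hfa := findOddAnswer_pos n.natAbs hodd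
      rw [hcast] at hfa
      rw [hfa, hcast]

-- ===== VERDICT =====
theorem solution_spec : Claim_equal_solution := by
  intro numbers hdom hpre
  unfold Spec_solution
  rw [solution_eq_map, alt_eq_map]
  apply List.map_congr_left
  intro x hx
  unfold Dom_solution at hdom
  rw [List.all_eq_true] at hdom
  have hdx := hdom x hx
  simp only [pvDomInt, decide_eq_true_eq] at hdx
  exact fA_eq_fB x hdx.1 (hpre x hx)
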